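-- pv_equiv track=rewrite | github.com/mattbillenstein/aoc | 2022/08/p.py | find_visible_product
-- ===== SOURCE A (Python) =====
-- def find_visible_product(i, L):
--     result = {}
--
--     # look from left and right compute the product of the number of trees
--     # visible...
--     for j, elem in enumerate(L):
--         height = elem
--         prod = 1
--         for step in (1, -1):
--             cnt = 0
--             k = j
--             k += step
--             while k >= 0 and k < len(L):
--                 cnt += 1
--                 if L[k] >= height:
--                     break
--                 k += step
--
--             prod *= cnt
--
--         result[(i, j)] = prod
--
--     return result
-- ===== SOURCE B (Python) =====
-- def find_visible_product(i, L):
--     # Monotonic-stack computation of left/right viewing distances in one pass each.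
--     n = len(L)
--     left = []
--     stack = []
--     for j in range(n):
--         while stack and L[stack[-1]] < L[j]:
--             stack.pop()
--         left.append(j - stack[-1] if stack else j)
--         stack.append(j)
--     right = [0] * n
--     stack = []
--     for j in range(n - 1, -1, -1):
--         while stack and L[stack[-1]] < L[j]:
--             stack.pop()
--         right[j] = (stack[-1] - j) if stack else (n - 1 - j)
--         stack.append(j)
--     return {(i, j): left[j] * right[j] for j in range(n)}
-- ===== Notes on version B (the rewrite author's own statement) =====
-- stated objective: faster
-- what changed: Replaces A's per-position linear scans in both directions by two monotonic-stack passes that compute each position's left/right viewing distance in amortized O(1).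
import Mathlib
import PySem

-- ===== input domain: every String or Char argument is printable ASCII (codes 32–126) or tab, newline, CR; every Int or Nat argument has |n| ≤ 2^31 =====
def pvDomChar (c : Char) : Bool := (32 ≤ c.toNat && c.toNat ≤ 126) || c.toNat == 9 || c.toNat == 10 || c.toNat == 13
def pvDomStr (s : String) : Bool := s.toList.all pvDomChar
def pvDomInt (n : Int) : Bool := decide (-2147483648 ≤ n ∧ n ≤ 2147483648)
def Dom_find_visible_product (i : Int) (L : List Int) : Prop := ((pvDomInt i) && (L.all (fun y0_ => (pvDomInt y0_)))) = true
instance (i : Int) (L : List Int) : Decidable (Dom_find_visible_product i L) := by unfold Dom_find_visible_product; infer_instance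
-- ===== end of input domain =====

-- B replaces A's per-position directional scans (O(n^2)) by two monotonic-stack passes (O(n)); equal output proved.

-- ===== PORT A =====
-- the 'while k >= 0 and k < len(L): cnt += 1; if L[k] >= height: break; k += step' loop;
-- fuel (L.length + 1) only makes the recursion structural, it is never exhausted on the calls made.
def aCnt (L : List Int) (height : Int) (step : Int) : Int → Nat → Int
  | _, 0 => 0
  | k, fuel+1 =>
    if 0 ≤ k ∧ k < (L.length : Int) then
      if height ≤ L.getD k.toNat 0 then 1
      else 1 + aCnt L height step (k + step) fuel
    else 0

-- for j, elem in enumerate(L): result[(i,j)] = cnt(step=1) * cnt(step=-1); keys (i,j) are distinct,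
-- so each dict insertion appends, in ascending j.
def find_visible_product (i : Int) (L : List Int) : List (Int × Int × Int) :=
  (List.range L.length).foldl
    (fun acc (j : Nat) =>
      acc ++ [(i, (j : Int),
        aCnt L (L.getD j 0) 1 ((j : Int) + 1) (L.length + 1) *
        aCnt L (L.getD j 0) (-1) ((j : Int) - 1) (L.length + 1))])
    []

-- ===== PORT B =====
-- 'while stack and L[stack[-1]] < L[j]: stack.pop()' (stack held head-first)
def popWhile (L : List Int) (x : Int) : List Nat → List Nat
  | [] => []
  | t :: s => if L.getD t 0 < x then popWhile L x s else t :: s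

-- left-to-right pass: state (stack, left); left.append(j - stack[-1] if stack else j); stack.append(j)
def leftPass (L : List Int) : List Int :=
  ((List.range L.length).foldl
    (fun (st : List Nat × List Int) (j : Nat) =>
      let s' := popWhile L (L.getD j 0) st.1
      let d : Int := match s' with | [] => (j : Int) | t :: _ => (j : Int) - (t : Int)
      (j :: s', st.2 ++ [d]))
    ([], [])).2

-- right-to-left pass: processes j = c-1 first (descending loop), then the rest; the value for
-- index c-1 is placed last so the returned list is in ascending index order (right[j] = ...).
def rp (L : List Int) : Nat → List Nat → List Int
  | 0, _ => []
  | c+1, s =>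
    let s' := popWhile L (L.getD c 0) s
    let d : Int := match s' with
      | [] => (L.length : Int) - 1 - (c : Int)
      | t :: _ => (t : Int) - (c : Int)
    rp L c (c :: s') ++ [d]

-- {(i, j): left[j] * right[j] for j in range(n)}
def find_visible_product_alt (i : Int) (L : List Int) : List (Int × Int × Int) :=
  (List.range L.length).map
    (fun (j : Nat) => (i, (j : Int), (leftPass L).getD j 0 * (rp L L.length []).getD j 0))

-- ===== PRECONDITION & SPEC =====
def Spec_find_visible_product (i : Int) (L : List Int) (out : List (Int × Int × Int)) : Prop := out = find_visible_product_alt i L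
instance (i : Int) (L : List Int) (out : List (Int × Int × Int)) : Decidable (Spec_find_visible_product i L out) := by unfold Spec_find_visible_product; infer_instance

-- ===== CLAIM (what is proved, stated in full; the proofs are below) =====
def Claim_equal_find_visible_product : Prop := ∀ (i : Int) (L : List Int), Dom_find_visible_product i L → Spec_find_visible_product i L (find_visible_product i L)

-- ===== LEMMAS AND PROOFS =====

-- greatest k < j with x ≤ L[k]
def prevGE (L : List Int) (x : Int) : Nat → Option Nat
  | 0 => none
  | j+1 => if x ≤ L.getD j 0 then some j else prevGE L x j

-- least k ≥ c (k < n) with x ≤ L[k]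
def sufGE (L : List Int) (x : Int) (c : Nat) : Option Nat :=
  if h : c < L.length then
    (if x ≤ L.getD c 0 then some c else sufGE L x (c+1))
  else none
  termination_by L.length - c

-- stack state of B's left pass after processing indices 0..j-1
def stkL (L : List Int) : Nat → List Nat
  | 0 => []
  | j+1 => j :: popWhile L (L.getD j 0) (stkL L j)

-- stack state of B's right pass after processing indices n-1..c
def stkR (L : List Int) (c : Nat) : List Nat :=
  if h : c < L.length then c :: popWhile L (L.getD c 0) (stkR L (c+1)) else []
  termination_by L.length - c

theorem popWhile_cons (L : List Int) (x : Int) (t : Nat) (s : List Nat) :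
    popWhile L x (t :: s) = if L.getD t 0 < x then popWhile L x s else t :: s := rfl

theorem popWhile_popWhile (L : List Int) {x y : Int} (h : y ≤ x) :
    ∀ s : List Nat, popWhile L x (popWhile L y s) = popWhile L x s := by
  intro s
  induction s with
  | nil => rfl
  | cons t s ih =>
    by_cases hy : L.getD t 0 < y
    · have hx : L.getD t 0 < x := lt_of_lt_of_le hy h
      rw [popWhile_cons, if_pos hy, ih, popWhile_cons, if_pos hx]
    · rw [popWhile_cons, if_neg hy, popWhile_cons]

theorem stkL_head (L : List Int) : ∀ (j : Nat) (x : Int),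
    (popWhile L x (stkL L j)).head? = prevGE L x j := by
  intro j
  induction j with
  | zero => intro x; rfl
  | succ j ih =>
    intro x
    by_cases hx : x ≤ L.getD j 0
    · have h2 : ¬ L.getD j 0 < x := not_lt.mpr hx
      rw [stkL, popWhile_cons, if_neg h2, List.head?_cons, prevGE, if_pos hx]
    · have hlt : L.getD j 0 < x := lt_of_not_ge hx
      rw [stkL, popWhile_cons, if_pos hlt, popWhile_popWhile L (le_of_lt hlt), ih,
        prevGE, if_neg hx]

theorem stkR_head (L : List Int) (c : Nat) (x : Int) :
    (popWhile L x (stkR L c)).head? = sufGE L x c := by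
  by_cases hc : c < L.length
  · rw [stkR, dif_pos hc, popWhile_cons]
    by_cases hx : x ≤ L.getD c 0
    · have h2 : ¬ L.getD c 0 < x := not_lt.mpr hx
      rw [if_neg h2, List.head?_cons, sufGE, dif_pos hc, if_pos hx]
    · have hlt : L.getD c 0 < x := lt_of_not_ge hx
      rw [if_pos hlt, popWhile_popWhile L (le_of_lt hlt), sufGE, dif_pos hc, if_neg hx]
      exact stkR_head L (c+1) x
  · rw [stkR, dif_neg hc, sufGE, dif_neg hc]
    rfl
  termination_by L.length - c

theorem aCnt_succ (L : List Int) (h step k : Int) (fuel : Nat) :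
    aCnt L h step k (fuel+1) =
      if 0 ≤ k ∧ k < (L.length : Int) then
        (if h ≤ L.getD k.toNat 0 then 1 else 1 + aCnt L h step (k + step) fuel)
      else 0 := rfl

-- A's left scan computes the distance to prevGE
theorem aCnt_left (L : List Int) (h : Int) : ∀ (j : Nat), j ≤ L.length → ∀ fuel, j ≤ fuel →
    aCnt L h (-1) ((j : Int) - 1) fuel =
      (match prevGE L h j with | none => (j : Int) | some t => (j : Int) - (t : Int)) := by
  intro j
  induction j with
  | zero =>
    intro _ fuel _
    match fuel with
    | 0 => rfl
    | fuel+1 =>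
      rw [show ((0 : Nat) : Int) - 1 = -1 by norm_num, aCnt_succ, if_neg (by omega)]
      rfl
  | succ j ih =>
    intro hj fuel hf
    match fuel with
    | 0 => omega
    | fuel+1 =>
      have hk : ((j+1 : Nat) : Int) - 1 = (j : Int) := by push_cast; ring
      have hrange : (0 : Int) ≤ (j : Int) ∧ (j : Int) < (L.length : Int) := by
        constructor <;> [positivity; exact_mod_cast Nat.lt_of_succ_le hj]
      rw [hk, aCnt_succ, if_pos hrange, Int.toNat_natCast]
      by_cases hx : h ≤ L.getD j 0
      · rw [if_pos hx, prevGE, if_pos hx]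
        push_cast; ring
      · rw [if_neg hx, prevGE, if_neg hx,
          show (j : Int) + (-1) = (j : Int) - 1 by ring,
          ih (by omega) fuel (by omega)]
        cases prevGE L h j with
        | none => push_cast; ring
        | some t => push_cast; ring

-- A's right scan computes the distance to sufGE
theorem aCnt_right (L : List Int) (h : Int) : ∀ fuel (c : Nat), c ≤ L.length → L.length - c ≤ fuel →
    aCnt L h 1 (c : Int) fuel =
      (match sufGE L h c with
        | none => (L.length : Int) - (c : Int)
        | some k => (k : Int) - (c : Int) + 1) := by
  intro fuel
  induction fuel with
  | zero =>
    intro c hc hf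
    have hcn : c = L.length := by omega
    subst hcn
    rw [show aCnt L h 1 (L.length : Int) 0 = 0 from rfl, sufGE, dif_neg (by omega)]
    push_cast; ring
  | succ fuel ih =>
    intro c hc hf
    by_cases hlt : c < L.length
    · have hrange : (0 : Int) ≤ (c : Int) ∧ (c : Int) < (L.length : Int) := by
        constructor <;> [positivity; exact_mod_cast hlt]
      rw [aCnt_succ, if_pos hrange, Int.toNat_natCast, sufGE, dif_pos hlt]
      by_cases hx : h ≤ L.getD c 0
      · rw [if_pos hx, if_pos hx]; push_cast; ring
      · rw [if_neg hx, if_neg hx,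
          show (c : Int) + 1 = ((c+1 : Nat) : Int) by push_cast; ring,
          ih (c+1) (by omega) (by omega)]
        cases sufGE L h (c+1) with
        | none => push_cast; ring
        | some k => push_cast; ring
    · have hcn : c = L.length := by omega
      subst hcn
      rw [aCnt_succ, if_neg (by omega), sufGE, dif_neg (by omega)]
      push_cast; ring

-- the foldl of the left pass is stkL plus the per-index values
def leftVal (L : List Int) (j : Nat) : Int :=
  match prevGE L (L.getD j 0) j with | none => (j : Int) | some t => (j : Int) - (t : Int)

def rightVal (L : List Int) (j : Nat) : Int :=
  match sufGE L (L.getD j 0) (j+1) with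
  | none => (L.length : Int) - 1 - (j : Int)
  | some t => (t : Int) - (j : Int)

theorem leftVal_match (L : List Int) (m : Nat) :
    (match popWhile L (L.getD m 0) (stkL L m) with
      | [] => (m : Int) | t :: _ => (m : Int) - (t : Int)) = leftVal L m := by
  have h := stkL_head L m (L.getD m 0)
  unfold leftVal
  cases hP : popWhile L (L.getD m 0) (stkL L m) <;> rw [hP] at h <;> rw [← h] <;> rfl

theorem rightVal_match (L : List Int) (m : Nat) :
    (match popWhile L (L.getD m 0) (stkR L (m+1)) with
      | [] => (L.length : Int) - 1 - (m : Int) | t :: _ => (t : Int) - (m : Int)) = rightVal L m := by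
  have h := stkR_head L (m+1) (L.getD m 0)
  unfold rightVal
  cases hP : popWhile L (L.getD m 0) (stkR L (m+1)) <;> rw [hP] at h <;> rw [← h] <;> rfl

theorem leftPass_eq (L : List Int) : ∀ m : Nat,
    (List.range m).foldl
      (fun (st : List Nat × List Int) (j : Nat) =>
        let s' := popWhile L (L.getD j 0) st.1
        let d : Int := match s' with | [] => (j : Int) | t :: _ => (j : Int) - (t : Int)
        (j :: s', st.2 ++ [d]))
      ([], []) = (stkL L m, (List.range m).map (leftVal L)) := by
  intro m
  induction m with
  | zero => rfl
  | succ m ih =>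
    rw [List.range_succ, List.foldl_append, ih, List.map_append]
    simp only [List.foldl_cons, List.foldl_nil, List.map_cons, List.map_nil]
    rw [show stkL L (m+1) = m :: popWhile L (L.getD m 0) (stkL L m) from rfl]
    exact congrArg _ (congrArg _ (congrArg (fun z => [z]) (leftVal_match L m)))

theorem rp_eq (L : List Int) : ∀ c : Nat, c ≤ L.length →
    rp L c (stkR L c) = (List.range c).map (rightVal L) := by
  intro c
  induction c with
  | zero => intro _; rfl
  | succ c ih =>
    intro hc
    have hstk : (c :: popWhile L (L.getD c 0) (stkR L (c+1))) = stkR L c := by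
      conv_rhs => rw [stkR]
      rw [dif_pos (Nat.lt_of_succ_le hc)]
    rw [show rp L (c+1) (stkR L (c+1)) =
        rp L c (c :: popWhile L (L.getD c 0) (stkR L (c+1))) ++
          [(match popWhile L (L.getD c 0) (stkR L (c+1)) with
            | [] => (L.length : Int) - 1 - (c : Int)
            | t :: _ => (t : Int) - (c : Int))] from rfl,
      hstk, ih (by omega), rightVal_match, List.range_succ, List.map_append, List.map_singleton]

theorem getD_map_range {f : Nat → Int} {n j : Nat} (h : j < n) :
    ((List.range n).map f).getD j 0 = f j := by
  rw [List.getD_eq_getElem?_getD]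
  simp [h]

theorem foldl_append_acc (g : Nat → Int × Int × Int) :
    ∀ (l : List Nat) (acc : List (Int × Int × Int)),
      l.foldl (fun a j => a ++ [g j]) acc = acc ++ l.map g := by
  intro l
  induction l with
  | nil => intro acc; simp
  | cons t l ih => intro acc; simp [ih]

-- ===== VERDICT (by name: the statement is the Claim_ definition above) =====
theorem find_visible_product_spec : Claim_equal_find_visible_product := by
  intro i L _
  unfold Spec_find_visible_product find_visible_product find_visible_product_alt
  rw [foldl_append_acc, List.nil_append]
  have hleft : leftPass L = (List.range L.length).map (leftVal L) := by
    unfold leftPass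
    rw [leftPass_eq]
  have hright : rp L L.length [] = (List.range L.length).map (rightVal L) := by
    rw [show ([] : List Nat) = stkR L L.length by rw [stkR, dif_neg (by omega)],
      rp_eq L L.length le_rfl]
  rw [hleft, hright]
  apply List.map_congr_left
  intro j hj
  have hjn : j < L.length := List.mem_range.mp hj
  rw [getD_map_range hjn, getD_map_range hjn]
  have hR := aCnt_right L (L.getD j 0) (L.length + 1) (j+1) (by omega) (by omega)
  rw [show ((j+1 : Nat) : Int) = (j : Int) + 1 by push_cast; ring] at hR
  have hL := aCnt_left L (L.getD j 0) j (by omega) (L.length + 1) (by omega)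
  rw [hR, hL]
  unfold leftVal rightVal
  cases sufGE L (L.getD j 0) (j+1) <;> cases prevGE L (L.getD j 0) j <;>
    simp only [Prod.mk.injEq, true_and] <;> push_cast <;> ring
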